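-- pv_equiv track=rewrite | github.com/fbarre96/Dofus-fight-simulator | Niveau.py | getCasesAXDistanceDe
-- ===== SOURCE A (Python) =====
-- def getCasesAXDistanceDe(caseX, caseY, distance):
--     """@summary: Méthode statique qui renvoie toutes les cases se trouvant
--                  sur un anneau de rayon donné autour d'une case.
--         @caseX: la coordonnée x de la case centrale
--         @type: int
--         @caseY: la coordonnée y de la case centrale
--         @type: int
--         @distance: le rayon de l'anneau dont l'on veut obtenir les cases
--         @type: int
--
--         @return:  Les cases sur l'anneau de rayon donné listées de
--                   gauche à droite puis de haut en bas """
--     departX = caseX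
--     departY = caseY
--     # La variable qui sera renvoyée
--     retour = []
--     # Cas de base
--     if distance == 0:
--         return [[caseX, caseY]]
--
--     # la logique de cette fonction est le parcours de l'anneau en partant du centre
--     # et en s'en écartant progressivement.
--     # pour chaque colonne, 2 cases sont sur le bon rayon
--     # sauf sur les deux colonnes aux extrêmes de l'anneau où il n'y en a qu'une.
--     # Ces deux colonne seront traitées séparemment des colonnes centrales.
--
--     # Le delta représente l'écart au centre en cordonnée X,
--     # Plus on s'éloigne du centre, plus l'écart en ordonnée se réduit
--     delta = 0
--     # Obligé de faire delta 0 (colonne centrale) a la main pour éviter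
--     # l'ajout de la ligne de delta +0 et delta -0
--     # Test si la coordonnée x est dans le grille de jeu
--     # if departX-delta >= 0:
--     #     # Test si la case haute de la colonne centre de l'anneau est dans le grille de jeu
--     #     if departY-distance+delta >= 0:
--     #         retour.append([departX-delta, departY-distance+delta])
--     #     # Test si la case basse de la colonne centre de l'anneau est dans le grille de jeu
--     #     if departY+distance-delta < constantes.taille_carte:
--     #         retour.append([departX-delta, departY+distance-delta])
--
--     # # Eloignement du centre de 1 en 1 jusqu'au rayon donné -1
--     # for delta in range(1, distance):
--     #     # On test si la colonne souhaitée à gauche du centre est dans la grille de jeu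
--     #     if departX-delta >= 0:
--     #         # On test si la ligne souhaitée en haut à gauche du centre est dans la grille de jeu
--     #         if departY-distance+delta >= 0:
--     #             retour.append([departX-delta, departY-distance+delta])
--     #         # On test si la ligne souhaitée en bas à gauche du centre est dans la grille de jeu
--     #         if departY+distance-delta < constantes.taille_carte:
--     #             retour.append([departX-delta, departY+distance-delta])
--     #     # On test si la colonne souhaitée à droite est dans la grille de jeu
--     #     if departX+delta < constantes.taille_carte:
--     #         # On test si la ligne souhaitée en haut à droite du centre est dans la grille de jeu
--     #         if departY-distance+delta >= 0:
--     #             retour.append([departX+delta, departY-distance+delta])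
--     #         # On test si la ligne souhaitée en bas à droite du centre est dans la grille de jeu
--     #         if departY+distance-delta < constantes.taille_carte:
--     #             retour.append([departX+delta, departY+distance-delta])
--     # delta = distance
--     # # Oblige de faire delta distance à la main car sur les colonnes les plus loins
--     # #  du centre il ny à q'une ligne à ajouter.
--     # # Test si la coordonnée x extême gauche est dans le grille de jeu
--     # if departX-delta >= 0:
--     #     # Test si la cooficherrdonnée y est dans le grille de jeu
--     #     if departY-distance+delta >= 0:
--     #         retour.append([departX-delta, departY-distance+delta])
--     # # Test si la coordonnée extême drotie x est dans le grille de jeu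
--     # if departX+delta < constantes.taille_carte:
--     #     # Test si la coordonnée y est dans le grille de jeu
--     #     if departY-distance+delta >= 0:
--     #         retour.append([departX+delta, departY-distance+delta])
--
--     for delta in range(0, distance+1):
--         retour.append([departX+distance-delta, departY+delta])
--     for delta in range(1, distance+1):
--         retour.append([departX-delta, departY+distance-delta])
--     for delta in range(1, distance+1):
--         retour.append([departX-distance+delta, departY-delta])
--     for delta in range(1, distance):
--         retour.append([departX+delta, departY-distance+delta])
--     # Return Les cases trouvées
--     return retour
-- ===== SOURCE B (Python) =====
-- def getCasesAXDistanceDe(caseX, caseY, distance):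
--     if distance < 0:
--         return []
--     if distance == 0:
--         return [[caseX, caseY]]
--     # One side of the ring as offset vectors from the centre; the other three
--     # sides are its images under successive 90-degree rotations (u,v) -> (-v,u).
--     side = [(distance - i, i) for i in range(distance)]
--     retour = []
--     for _ in range(4):
--         retour += [[caseX + u, caseY + v] for (u, v) in side]
--         side = [(-v, u) for (u, v) in side]
--     return retour
-- ===== Notes on version B (the rewrite author's own statement) =====
-- stated objective: alternative
-- what changed: Instead of four separately-coded coordinate loops, B computes only one diamond side as offset vectors and derives the other three sides by repeatedly applying a 90-degree rotation (u,v)->(-v,u) to that side inside a 4-iteration loop.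
import Mathlib
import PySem

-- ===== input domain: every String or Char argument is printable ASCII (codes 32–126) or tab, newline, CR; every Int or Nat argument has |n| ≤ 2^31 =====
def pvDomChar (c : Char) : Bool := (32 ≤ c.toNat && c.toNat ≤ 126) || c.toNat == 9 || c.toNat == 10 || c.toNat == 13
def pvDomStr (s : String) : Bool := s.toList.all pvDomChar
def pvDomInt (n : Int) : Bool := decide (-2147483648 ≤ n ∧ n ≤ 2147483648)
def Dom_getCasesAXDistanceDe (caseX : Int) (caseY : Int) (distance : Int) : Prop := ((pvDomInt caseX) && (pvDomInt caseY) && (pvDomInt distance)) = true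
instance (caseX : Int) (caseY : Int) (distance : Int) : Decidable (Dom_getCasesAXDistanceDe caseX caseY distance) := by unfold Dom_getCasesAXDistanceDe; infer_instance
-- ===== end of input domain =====

-- B builds only one diamond side as offset vectors and derives the other three sides
-- by repeated 90° rotation of those vectors, instead of A's four coordinate loops
-- (objective: alternative).

-- ===== PORT A =====
def getCasesAXDistanceDe (caseX : Int) (caseY : Int) (distance : Int) : List (List Int) :=
  if distance = 0 then [[caseX, caseY]]
  else
    let r0 : List (List Int) := []
    let r1 := (PySem.List.pyRange 0 (distance+1) 1).foldl
      (fun acc delta => acc ++ [[caseX+distance-delta, caseY+delta]]) r0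
    let r2 := (PySem.List.pyRange 1 (distance+1) 1).foldl
      (fun acc delta => acc ++ [[caseX-delta, caseY+distance-delta]]) r1
    let r3 := (PySem.List.pyRange 1 (distance+1) 1).foldl
      (fun acc delta => acc ++ [[caseX-distance+delta, caseY-delta]]) r2
    (PySem.List.pyRange 1 distance 1).foldl
      (fun acc delta => acc ++ [[caseX+delta, caseY-distance+delta]]) r3

-- ===== PORT B =====
-- Source B's comprehension '[[caseX + u, caseY + v] for (u, v) in side]'
def pvEmit (x y : Int) (s : List (Int × Int)) : List (List Int) :=
  s.map (fun p => [x + p.1, y + p.2])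

-- Source B's rotation comprehension '[(-v, u) for (u, v) in side]'
def pvRot (s : List (Int × Int)) : List (Int × Int) :=
  s.map (fun p => (-p.2, p.1))

def getCasesAXDistanceDe_alt (caseX : Int) (caseY : Int) (distance : Int) : List (List Int) :=
  if distance < 0 then []
  else if distance = 0 then [[caseX, caseY]]
  else
    let side := (List.range distance.toNat).map (fun i : Nat => (distance - (i:Int), (i:Int)))
    ((List.range 4).foldl
      (fun st _ => (st.1 ++ pvEmit caseX caseY st.2, pvRot st.2)) ([], side)).1

-- ===== PRECONDITION & SPEC =====
def Spec_getCasesAXDistanceDe (caseX : Int) (caseY : Int) (distance : Int) (out : List (List Int)) : Prop := out = getCasesAXDistanceDe_alt caseX caseY distance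
instance (caseX : Int) (caseY : Int) (distance : Int) (out : List (List Int)) : Decidable (Spec_getCasesAXDistanceDe caseX caseY distance out) := by unfold Spec_getCasesAXDistanceDe; infer_instance

-- ===== CLAIM (what is proved, stated in full; the proofs are below) =====
def Claim_equal_getCasesAXDistanceDe : Prop := ∀ (caseX : Int) (caseY : Int) (distance : Int), Dom_getCasesAXDistanceDe caseX caseY distance → Spec_getCasesAXDistanceDe caseX caseY distance (getCasesAXDistanceDe caseX caseY distance)

-- ===== LEMMAS AND PROOFS =====

-- shift a head element into a map over one-longer range
theorem pv_shift {α : Type} (g : Nat → α) (m : Nat) :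
    g 0 :: (List.range m).map (fun k => g (k+1)) = (List.range (m+1)).map g := by
  rw [List.range_succ_eq_map, List.map_cons, List.map_map]
  rfl

theorem pv_split {α : Type} (g : Nat → α) (m : Nat) :
    (List.range (m+1)).map g = (List.range m).map g ++ [g m] := by
  rw [List.range_succ, List.map_append, List.map_singleton]

-- regroup the four A-chunks (sizes n+2, n+1, n+1, n) into the four B-chunks (each n+1)
theorem pv_regroup {α : Type} (n : Nat) (g0 g1 g2 g3 : Nat → α)
    (c1 : g0 (n+1) = g1 0) (c2 : g1 (n+1) = g2 0) (c3 : g2 (n+1) = g3 0) :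
    (List.range (n+2)).map g0 ++
      ((List.range (n+1)).map (fun k => g1 (k+1)) ++
        ((List.range (n+1)).map (fun k => g2 (k+1)) ++ (List.range n).map (fun k => g3 (k+1)))) =
    (List.range (n+1)).map g0 ++
      ((List.range (n+1)).map g1 ++ ((List.range (n+1)).map g2 ++ (List.range (n+1)).map g3)) := by
  rw [show n+2 = (n+1)+1 from rfl, pv_split g0 (n+1), c1, List.append_assoc,
      List.singleton_append, ← List.cons_append, pv_shift g1 (n+1),
      pv_split g1 (n+1), c2, List.append_assoc, List.singleton_append,
      ← List.cons_append, pv_shift g2 (n+1), pv_split g2 (n+1), c3,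
      List.append_assoc, List.singleton_append, pv_shift g3 n]

theorem pv_main : ∀ (caseX caseY distance : Int),
    getCasesAXDistanceDe caseX caseY distance = getCasesAXDistanceDe_alt caseX caseY distance := by
  intro cx cy d
  unfold getCasesAXDistanceDe getCasesAXDistanceDe_alt
  rcases lt_trichotomy d 0 with hneg | rfl | hpos
  · rw [if_neg (by omega), if_pos hneg]
    rw [PySem.List.pyRange_one_eq_nil (show d + 1 ≤ (0:Int) by omega),
        PySem.List.pyRange_one_eq_nil (show d + 1 ≤ (1:Int) by omega),
        PySem.List.pyRange_one_eq_nil (show d ≤ (1:Int) by omega)]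
    simp
  · simp
  · rw [if_neg (by omega), if_neg (by omega), if_neg (by omega)]
    obtain ⟨n, hn⟩ : ∃ n : Nat, d.toNat = n + 1 := ⟨d.toNat - 1, by omega⟩
    have hd : d = (n:Int) + 1 := by omega
    have hA : (let r0 : List (List Int) := []
        let r1 := (PySem.List.pyRange 0 (d+1) 1).foldl
          (fun acc delta => acc ++ [[cx+d-delta, cy+delta]]) r0
        let r2 := (PySem.List.pyRange 1 (d+1) 1).foldl
          (fun acc delta => acc ++ [[cx-delta, cy+d-delta]]) r1
        let r3 := (PySem.List.pyRange 1 (d+1) 1).foldl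
          (fun acc delta => acc ++ [[cx-d+delta, cy-delta]]) r2
        (PySem.List.pyRange 1 d 1).foldl
          (fun acc delta => acc ++ [[cx+delta, cy-d+delta]]) r3) =
        (List.range (n+2)).map (fun k : Nat => [cx + d - (k:Int), cy + (k:Int)]) ++
          ((List.range (n+1)).map (fun k : Nat => [cx - ((k:Int)+1), cy + (d - ((k:Int)+1))]) ++
            ((List.range (n+1)).map (fun k : Nat => [cx - (d - ((k:Int)+1)), cy - ((k:Int)+1)]) ++
              (List.range n).map (fun k : Nat => [cx + ((k:Int)+1), cy - (d - ((k:Int)+1))]))) := by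
      simp only [PySem.List.foldl_append_singleton_eq_map, List.nil_append,
        PySem.List.pyRange_one, List.map_map, List.append_assoc]
      rw [show (d + 1 - 0).toNat = n + 2 by omega,
          show (d + 1 - 1).toNat = n + 1 by omega,
          show (d - 1).toNat = n by omega]
      refine congr_arg₂ (· ++ ·) ?_ (congr_arg₂ (· ++ ·) ?_ (congr_arg₂ (· ++ ·) ?_ ?_)) <;>
        · apply List.map_congr_left; intro k _
          simp only [Function.comp_apply, List.cons.injEq, and_true]
          all_goals omega
    have hB : (let side := (List.range d.toNat).map (fun i : Nat => (d - (i:Int), (i:Int)))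
        ((List.range 4).foldl
          (fun st _ => (st.1 ++ pvEmit cx cy st.2, pvRot st.2)) ([], side)).1) =
        (List.range (n+1)).map (fun k : Nat => [cx + d - (k:Int), cy + (k:Int)]) ++
          ((List.range (n+1)).map (fun k : Nat => [cx - (k:Int), cy + (d - (k:Int))]) ++
            ((List.range (n+1)).map (fun k : Nat => [cx - (d - (k:Int)), cy - (k:Int)]) ++
              (List.range (n+1)).map (fun k : Nat => [cx + (k:Int), cy - (d - (k:Int))]))) := by
      rw [show List.range 4 = [0,1,2,3] from rfl]
      simp only [List.foldl_cons, List.foldl_nil, pvEmit, pvRot, List.map_map,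
        List.nil_append, List.append_assoc, hn]
      refine congr_arg₂ (· ++ ·) ?_ (congr_arg₂ (· ++ ·) ?_ (congr_arg₂ (· ++ ·) ?_ ?_)) <;>
        · apply List.map_congr_left; intro k _
          simp only [Function.comp_apply, List.cons.injEq, and_true]
          all_goals omega
    rw [hA, hB]
    exact pv_regroup n
      (fun k : Nat => [cx + d - (k:Int), cy + (k:Int)])
      (fun k : Nat => [cx - (k:Int), cy + (d - (k:Int))])
      (fun k : Nat => [cx - (d - (k:Int)), cy - (k:Int)])
      (fun k : Nat => [cx + (k:Int), cy - (d - (k:Int))])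
      (by subst hd; beta_reduce; simp only [List.cons.injEq, and_true]; constructor <;> push_cast <;> ring)
      (by subst hd; beta_reduce; simp only [List.cons.injEq, and_true]; constructor <;> push_cast <;> ring)
      (by subst hd; beta_reduce; simp only [List.cons.injEq, and_true]; constructor <;> push_cast <;> ring)

-- ===== VERDICT (by name: the statement is the Claim_ definition above) =====
theorem getCasesAXDistanceDe_spec : Claim_equal_getCasesAXDistanceDe := by
  intro cx cy d _
  exact pv_main cx cy d
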